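-- pv_equiv track=rewrite | github.com/HappyKlay/unik | Stack and Queue/queue/8.py | maxSubsequenceSum
-- ===== SOURCE A (Python) =====
-- from collections import deque
-- from typing import List
--
-- def maxSubsequenceSum(nums: List[int], k: int) -> int:
--     n = len(nums)
--     dp = [0] * n
--     dp[0] = nums[0]
--     max_sum = dp[0]
--
--     dq = deque([0])
--
--     for i in range(1, n):
--         if dq[0] < i - k:
--             dq.popleft()
--
--         dp[i] = nums[i] + (dp[dq[0]] if dq else 0)
--
--         max_sum = max(max_sum, dp[i])
--
--         while dq and dp[dq[-1]] <= dp[i]: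
--             dq.pop()
--
--         dq.append(i)
--
--     return max_sum
-- ===== SOURCE B (Python) =====
-- def maxSubsequenceSum(nums, k):
--     dp = []
--     for i, x in enumerate(nums):
--         window = dp[max(0, i - k):i]
--         dp.append(x + (max(window) if window else 0))
--     return max(dp)
-- ===== Notes on version B (the rewrite author's own statement) =====
-- stated objective: simpler
-- what changed: Replaced the preallocated dp array, running max accumulator and monotonic deque with a plain dp list grown by append, where each dp[i] adds the max of the slice of the previous k dp entries and the answer is max(dp).
import Mathlib
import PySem

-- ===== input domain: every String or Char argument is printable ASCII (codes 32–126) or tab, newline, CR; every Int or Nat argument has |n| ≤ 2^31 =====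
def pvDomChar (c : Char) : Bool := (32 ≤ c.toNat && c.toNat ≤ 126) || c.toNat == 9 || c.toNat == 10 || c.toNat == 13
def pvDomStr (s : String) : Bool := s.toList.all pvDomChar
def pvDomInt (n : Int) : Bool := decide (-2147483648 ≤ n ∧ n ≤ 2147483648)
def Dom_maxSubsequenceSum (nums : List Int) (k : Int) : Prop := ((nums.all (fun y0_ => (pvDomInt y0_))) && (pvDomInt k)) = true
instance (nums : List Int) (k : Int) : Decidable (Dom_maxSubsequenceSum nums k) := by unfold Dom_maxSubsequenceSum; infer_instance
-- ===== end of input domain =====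

-- B replaces A's monotonic deque and preallocated dp array with a plain dp list where each
-- entry adds the max of the slice of the previous k entries: simpler (shorter, no deque), not faster.
-- ===== PORT A =====
-- dp[j] for an in-range non-negative index (exact there)
def pvDpGet (dp : List Int) (j : Int) : Int := PySem.List.pyGetD dp j 0

-- one iteration of A's for-loop (state: dp array, max_sum, deque front-at-head)
def pvStepA (nums : List Int) (k : Int) (st : List Int × Int × List Int) (i : Int) :
    List Int × Int × List Int :=
  let dp := st.1
  let maxSum := st.2.1
  let dq := st.2.2
  let dq := match dq with
            | [] => dq
            | j :: rest => if j < i - k then rest else dq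
  let dpi := PySem.List.pyGetD nums i 0 +
             (match dq with | [] => 0 | j :: _ => pvDpGet dp j)
  let dp := PySem.List.pySetD dp i dpi
  let maxSum := max maxSum dpi
  let dq := (dq.reverse.dropWhile (fun j => pvDpGet dp j ≤ dpi)).reverse
  (dp, maxSum, dq ++ [i])

def maxSubsequenceSum (nums : List Int) (k : Int) : Int :=
  match nums with
  | [] => 0   -- Python raises IndexError at dp[0] = nums[0]; excluded by Pre_
  | x :: _ =>
    let dp := PySem.List.pySetD (List.replicate nums.length 0) 0 x
    let st := (PySem.List.pyRange 1 (nums.length : Int) 1).foldl (pvStepA nums k) (dp, x, [(0 : Int)])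
    st.2.1

-- ===== PORT B =====
-- one iteration of B's loop: append nums[i] + max of the window slice (0 if empty)
def pvStepB (k : Int) (dp : List Int) (p : Int × Int) : List Int :=
  let window := PySem.List.slice dp (some (max 0 (p.1 - k))) (some p.1)
  dp ++ [p.2 + (match PySem.List.max? window (fun y => y) with
                | some m => m
                | none => 0)]

def maxSubsequenceSum_alt (nums : List Int) (k : Int) : Int :=
  let dp := (PySem.List.enumerate nums 0).foldl (pvStepB k) []
  match PySem.List.max? dp (fun y => y) with
  | some m => m
  | none => 0   -- Python raises ValueError on max([]); excluded by Pre_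

-- ===== PRECONDITION & SPEC =====
-- Pre_ excludes only the empty list, on which A raises IndexError (and B raises ValueError).
def Pre_maxSubsequenceSum (nums : List Int) (k : Int) : Prop := nums ≠ []
instance (nums : List Int) (k : Int) : Decidable (Pre_maxSubsequenceSum nums k) := by
  unfold Pre_maxSubsequenceSum; infer_instance
def pvWitness_maxSubsequenceSum : List Int × Int := ([1, -2, 3], 2)
def Spec_maxSubsequenceSum (nums : List Int) (k : Int) (out : Int) : Prop := out = maxSubsequenceSum_alt nums k
instance (nums : List Int) (k : Int) (out : Int) : Decidable (Spec_maxSubsequenceSum nums k out) := by unfold Spec_maxSubsequenceSum; infer_instance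

-- ===== CLAIM (what is proved, stated in full; the proofs are below) =====
def Claim_equal_maxSubsequenceSum : Prop := ∀ (nums : List Int) (k : Int), Dom_maxSubsequenceSum nums k → Pre_maxSubsequenceSum nums k → Spec_maxSubsequenceSum nums k (maxSubsequenceSum nums k)

-- ===== LEMMAS AND PROOFS =====

-- B's dp list after the first m iterations
def pvBdp (nums : List Int) (k : Int) : Nat → List Int
  | 0 => []
  | m+1 => pvStepB k (pvBdp nums k m) ((m : Int), nums.getD m 0)

-- the window maximum B adds at index m (0 when the window slice is empty)
def pvWv (nums : List Int) (k : Int) (m : Nat) : Int :=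
  match PySem.List.max? (PySem.List.slice (pvBdp nums k m) (some (max 0 ((m:Int) - k))) (some (m:Int))) (fun y => y) with
  | some v => v
  | none => 0

-- B's dp value at index m
def pvDv (nums : List Int) (k : Int) (m : Nat) : Int := nums.getD m 0 + pvWv nums k m

lemma pvBdp_succ (nums : List Int) (k : Int) (m : Nat) :
    pvBdp nums k (m+1) = pvBdp nums k m ++ [pvDv nums k m] := rfl

lemma pvBdp_length (nums : List Int) (k : Int) : ∀ m : Nat, (pvBdp nums k m).length = m := by
  intro m
  induction m with
  | zero => rfl
  | succ m ih => rw [pvBdp_succ]; simp [ih]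

lemma pvBdp_getElem? (nums : List Int) (k : Int) : ∀ (m j : Nat), j < m →
    (pvBdp nums k m)[j]? = some (pvDv nums k j) := by
  intro m
  induction m with
  | zero => intro j hj; omega
  | succ m ih =>
    intro j hj
    rw [pvBdp_succ]
    rcases Nat.lt_or_ge j m with hlt | hge
    · rw [List.getElem?_append_left (by rw [pvBdp_length]; exact hlt)]
      exact ih j hlt
    · have hj' : j = m := by omega
      subst hj'
      have hcc : (pvBdp nums k j ++ [pvDv nums k j])[(pvBdp nums k j).length]? = some (pvDv nums k j) :=
        List.getElem?_concat_length
      rw [pvBdp_length] at hcc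
      exact hcc

lemma pvBdp_ext (nums ext : List Int) (k : Int) : ∀ m : Nat, m ≤ nums.length →
    pvBdp (nums ++ ext) k m = pvBdp nums k m := by
  intro m
  induction m with
  | zero => intro _; rfl
  | succ m ih =>
    intro hm
    have h1 := ih (by omega)
    show pvStepB k (pvBdp (nums ++ ext) k m) ((m : Int), (nums ++ ext).getD m 0)
       = pvStepB k (pvBdp nums k m) ((m : Int), nums.getD m 0)
    rw [h1, List.getD_append _ _ _ _ (by omega)]

lemma pvFoldB (nums : List Int) (k : Int) :
    (PySem.List.enumerate nums 0).foldl (pvStepB k) [] = pvBdp nums k nums.length := by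
  induction nums using List.reverseRecOn with
  | nil => simp [PySem.List.enumerate]; rfl
  | append_singleton xs y ih =>
    rw [PySem.List.enumerate_append, List.foldl_append, ih]
    have h1 : PySem.List.enumerate [y] (0 + (xs.length : Int)) = [((xs.length : Int), y)] := by
      rw [PySem.List.enumerate_cons]; simp [PySem.List.enumerate]
    rw [h1]
    have hext := pvBdp_ext xs [y] k xs.length (le_refl _)
    have hlen : (xs ++ [y]).length = xs.length + 1 := by simp
    rw [hlen]
    show pvStepB k (pvBdp xs k xs.length) ((xs.length : Int), y)
       = pvStepB k (pvBdp (xs ++ [y]) k xs.length) (((xs.length : Nat) : Int), (xs ++ [y]).getD xs.length 0)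
    rw [hext]
    congr 1
    · simp [List.getD]

lemma pvAltB (nums : List Int) (k : Int) :
    maxSubsequenceSum_alt nums k =
      match PySem.List.max? (pvBdp nums k nums.length) (fun y => y) with
      | some v => v
      | none => 0 := by
  show (match PySem.List.max? ((PySem.List.enumerate nums 0).foldl (pvStepB k) []) (fun y => y) with
        | some v => v
        | none => (0:Int)) = _
  rw [pvFoldB]

-- A's loop state after iterations 1..m
def pvAst (nums : List Int) (k x : Int) : Nat → List Int × Int × List Int
  | 0 => (PySem.List.pySetD (List.replicate nums.length 0) 0 x, x, [(0:Int)])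
  | m+1 => pvStepA nums k (pvAst nums k x m) ((m:Int)+1)

lemma pvFoldA (nums : List Int) (k x : Int) : ∀ m : Nat,
    (PySem.List.pyRange 1 (1 + (m:Int)) 1).foldl (pvStepA nums k) (pvAst nums k x 0) = pvAst nums k x m := by
  intro m
  induction m with
  | zero => rfl
  | succ m ih =>
    have h1 : (1 : Int) + ((m:Nat)+1 : Nat) = (1 + (m:Int)) + 1 := by push_cast; ring
    rw [h1, PySem.List.pyRange_one_succ_right (by omega), List.foldl_append, ih]
    show pvStepA nums k (pvAst nums k x m) (1 + (m:Int)) = pvStepA nums k (pvAst nums k x m) ((m:Int)+1)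
    rw [Int.add_comm]

lemma pvRunA (x : Int) (rest : List Int) (k : Int) :
    maxSubsequenceSum (x :: rest) k = (pvAst (x :: rest) k x ((x :: rest).length - 1)).2.1 := by
  have hn : ((x :: rest).length : Int) = 1 + (((x :: rest).length - 1 : Nat) : Int) := by
    simp
    ring
  show ((PySem.List.pyRange 1 ((x :: rest).length : Int) 1).foldl (pvStepA (x :: rest) k)
      (pvAst (x :: rest) k x 0)).2.1 = _
  rw [hn, pvFoldA (x :: rest) k x ((x :: rest).length - 1)]

-- the deque invariant after iteration m
def pvDqInv (nums : List Int) (k : Int) (m : Nat) (dq : List Int) : Prop :=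
  dq.Pairwise (· < ·) ∧
  (∀ j ∈ dq, min ((m:Int) - k) (m:Int) ≤ j ∧ 0 ≤ j ∧ j ≤ (m:Int)) ∧
  ((m:Int) ∈ dq) ∧
  dq.Pairwise (fun a b => pvDv nums k b.toNat < pvDv nums k a.toNat) ∧
  (∀ j : Int, 0 ≤ j → (m:Int) - k ≤ j → j ≤ (m:Int) → j ∉ dq →
      ∃ l ∈ dq, j < l ∧ pvDv nums k j.toNat ≤ pvDv nums k l.toNat)

-- the full loop invariant
def pvInv (nums : List Int) (k x : Int) (m : Nat) : Prop :=
  ((pvAst nums k x m).1.length = nums.length) ∧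
  (∀ j : Nat, j ≤ m → PySem.List.pyGetD (pvAst nums k x m).1 ((j:Nat):Int) 0 = pvDv nums k j) ∧
  PySem.List.max? (pvBdp nums k (m+1)) (fun y => y) = some (pvAst nums k x m).2.1 ∧
  pvDqInv nums k m (pvAst nums k x m).2.2

lemma pvMax?_id_eq {l : List Int} {v : Int} (hv : v ∈ l) (hmax : ∀ y ∈ l, y ≤ v) :
    PySem.List.max? l (fun y => y) = some v := by
  cases hm : PySem.List.max? l (fun y => y) with
  | none =>
    rw [PySem.List.max?_eq_none_iff] at hm
    subst hm; simp at hv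
  | some w =>
    have h1 : v ≤ w := PySem.List.max?_isMax hm v hv
    have h2 : w ≤ v := hmax w (PySem.List.max?_mem hm)
    rw [le_antisymm h1 h2]

lemma pvMax?_id_concat {l : List Int} {w v : Int}
    (h : PySem.List.max? l (fun y => y) = some w) :
    PySem.List.max? (l ++ [v]) (fun y => y) = some (max w v) := by
  apply pvMax?_id_eq
  · rcases max_choice w v with hmw | hmv
    · rw [hmw]; exact List.mem_append_left _ (PySem.List.max?_mem h)
    · rw [hmv]; exact List.mem_append_right _ (by simp)
  · intro y hy
    rcases List.mem_append.1 hy with hyl | hyr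
    · exact le_trans (PySem.List.max?_isMax h y hyl) (le_max_left _ _)
    · simp at hyr; rw [hyr]; exact le_max_right _ _

lemma pvWv_succ_of_nonpos (nums : List Int) (k : Int) (hk : k ≤ 0) (m : Nat) :
    pvWv nums k (m+1) = 0 := by
  unfold pvWv
  have h0 : (0:Int) ≤ max 0 (((m+1:Nat):Int) - k) := le_max_left _ _
  rw [PySem.List.slice_toNat _ h0 (by positivity)]
  have ha : (max 0 (((m+1:Nat):Int) - k)).toNat ≥ m + 1 := by
    have : ((m+1:Nat):Int) - k ≥ ((m+1:Nat):Int) := by omega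
    have h2 : max 0 (((m+1:Nat):Int) - k) = ((m+1:Nat):Int) - k := by omega
    omega
  rw [List.drop_eq_nil_of_le (by rw [pvBdp_length]; exact ha)]
  simp [PySem.List.max?]

lemma pvWv_zero (nums : List Int) (k : Int) : pvWv nums k 0 = 0 := by
  unfold pvWv
  show (match PySem.List.max? (PySem.List.slice ([] : List Int) _ _) (fun y => y) with
        | some v => v | none => (0:Int)) = 0
  rw [PySem.List.slice_toNat _ (le_max_left _ _) (by omega)]
  simp [PySem.List.max?]

-- window maximum via a dominating in-window index (the k ≥ 1 case)
lemma pvWv_succ_eq (nums : List Int) (k : Int) (m : Nat) (h' : Int)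
    (h0 : 0 ≤ h') (hub : h' ≤ (m:Int)) (hlb : (m:Int) + 1 - k ≤ h')
    (dom : ∀ j : Int, 0 ≤ j → (m:Int) + 1 - k ≤ j → j ≤ (m:Int) →
        pvDv nums k j.toNat ≤ pvDv nums k h'.toNat) :
    pvWv nums k (m+1) = pvDv nums k h'.toNat := by
  unfold pvWv
  have hcast : (((m+1:Nat)):Int) = (m:Int) + 1 := by push_cast; ring
  set a : Int := max 0 (((m+1:Nat):Int) - k) with ha
  have ha0 : (0:Int) ≤ a := le_max_left _ _
  have hah : a ≤ h' := by
    rcases max_cases (0:Int) (((m+1:Nat):Int) - k) with ⟨he, _⟩ | ⟨he, _⟩ <;> rw [ha, he] <;> omega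
  rw [PySem.List.slice_toNat _ ha0 (by positivity)]
  have hlen : (pvBdp nums k (m+1)).length = m + 1 := pvBdp_length nums k (m+1)
  have haN : a.toNat ≤ h'.toNat := Int.toNat_le_toNat hah
  have hh'N : h'.toNat ≤ m := by omega
  have htake : ((pvBdp nums k (m+1)).drop a.toNat).length ≤ ((m+1:Nat):Int).toNat - a.toNat := by
    rw [List.length_drop, hlen]; omega
  rw [List.take_of_length_le htake]
  have hwin_get : ∀ (idx : Nat), idx < ((pvBdp nums k (m+1)).drop a.toNat).length →
      ((pvBdp nums k (m+1)).drop a.toNat)[idx]? = some (pvDv nums k (a.toNat + idx)) := by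
    intro idx hidx
    rw [List.getElem?_drop]
    apply pvBdp_getElem?
    rw [List.length_drop, hlen] at hidx
    omega
  have hmem : pvDv nums k h'.toNat ∈ (pvBdp nums k (m+1)).drop a.toNat := by
    have hidx : h'.toNat - a.toNat < ((pvBdp nums k (m+1)).drop a.toNat).length := by
      rw [List.length_drop, hlen]; omega
    have := hwin_get (h'.toNat - a.toNat) hidx
    rw [show a.toNat + (h'.toNat - a.toNat) = h'.toNat by omega] at this
    exact List.mem_of_getElem? this
  have hbound : ∀ y ∈ (pvBdp nums k (m+1)).drop a.toNat, y ≤ pvDv nums k h'.toNat := by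
    intro y hy
    obtain ⟨idx, hidx, hyv⟩ := List.mem_iff_getElem.1 hy
    have hg := hwin_get idx hidx
    rw [List.getElem?_eq_getElem hidx] at hg
    have hyv' : y = pvDv nums k (a.toNat + idx) := by rw [← hyv]; exact Option.some.inj hg
    rw [List.length_drop, hlen] at hidx
    have := dom ((a.toNat + idx : Nat) : Int) (by positivity)
      (by have : ((m+1:Nat):Int) - k ≤ a := le_max_right _ _
          have h2 : (a : Int) ≤ ((a.toNat + idx : Nat) : Int) := by
            rw [← Int.toNat_of_nonneg ha0]; push_cast; omega
          push_cast at *; omega)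
      (by push_cast; omega)
    rw [Int.toNat_natCast] at this
    rw [hyv']; exact this
  rw [pvMax?_id_eq hmem hbound]

-- pop-from-back helpers
lemma pvPopback_prefix (p : Int → Bool) (l : List Int) :
    ((l.reverse.dropWhile p).reverse) <+: l := by
  have h := List.dropWhile_suffix (l := l.reverse) p
  have h2 := (List.reverse_prefix (l₁ := l.reverse.dropWhile p) (l₂ := l.reverse)).2 h
  rwa [List.reverse_reverse] at h2

lemma pvPopback_mem_or (p : Int → Bool) (l : List Int) (j : Int) (hj : j ∈ l) :
    j ∈ (l.reverse.dropWhile p).reverse ∨ p j = true := by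
  have hj' : j ∈ l.reverse := List.mem_reverse.2 hj
  rw [← List.takeWhile_append_dropWhile (p := p) (l := l.reverse)] at hj'
  rcases List.mem_append.1 hj' with h1 | h2
  · exact Or.inr (List.mem_takeWhile_imp h1)
  · exact Or.inl (List.mem_reverse.2 h2)

-- stale-pop: the head of the (possibly popped) deque dominates the new window (k ≥ 1)
lemma pvHeadDom (nums : List Int) (k : Int) (m : Nat) (h : Int) (t : List Int)
    (inv : pvDqInv nums k m (h :: t)) (hk : 1 ≤ k) :
    ∃ h' t', (if h < (m:Int)+1 - k then t else h :: t) = h' :: t' ∧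
      (m:Int)+1-k ≤ h' ∧ 0 ≤ h' ∧ h' ≤ (m:Int) ∧
      (∀ j : Int, 0 ≤ j → (m:Int)+1-k ≤ j → j ≤ (m:Int) →
          pvDv nums k j.toNat ≤ pvDv nums k h'.toNat) ∧
      (∀ j ∈ (if h < (m:Int)+1 - k then t else h :: t), (m:Int)+1-k ≤ j) := by
  obtain ⟨hchain, hbnd, hmem, hdec, hcov⟩ := inv
  have hminK : min ((m:Int) - k) (m:Int) = (m:Int) - k := by omega
  have hbh := hbnd h (by simp)
  rw [hminK] at hbh
  have htail_lt : ∀ j ∈ t, h < j := (List.pairwise_cons.1 hchain).1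
  by_cases hpop : h < (m:Int)+1 - k
  · -- pop: h = m - k exactly; t nonempty (contains m)
    have hhm : h ≠ (m:Int) := by omega
    have hmt : (m:Int) ∈ t := by
      rcases List.mem_cons.1 hmem with h1 | h1
      · exact absurd h1.symm hhm
      · exact h1
    obtain ⟨h', t', ht⟩ : ∃ h' t', t = h' :: t' := by
      cases t with
      | nil => simp at hmt
      | cons a b => exact ⟨a, b, rfl⟩
    have htbnd : ∀ j ∈ t, (m:Int)+1-k ≤ j := by
      intro j hj
      have := (hbnd j (List.mem_cons_of_mem _ hj))
      rw [hminK] at this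
      have := htail_lt j hj
      omega
    refine ⟨h', t', by simp [hpop, ht], ?_, ?_, ?_, ?_, ?_⟩
    · exact htbnd h' (by rw [ht]; simp)
    · exact (hbnd h' (by rw [ht]; simp)).2.1
    · exact (hbnd h' (by rw [ht]; simp)).2.2
    · intro j hj0 hjlb hjub
      by_cases hjdq : j ∈ h :: t
      · rcases List.mem_cons.1 hjdq with h1 | h1
        · omega
        · rw [ht] at h1
          rcases List.mem_cons.1 h1 with h2 | h2
          · rw [h2]
          · have hp := hdec
            rw [ht] at hp
            exact le_of_lt ((List.pairwise_cons.1 (List.pairwise_cons.1 hp).2).1 j h2)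
      · obtain ⟨l, hl, hjl, hvl⟩ := hcov j hj0 (by omega) (by omega) hjdq
        rcases List.mem_cons.1 hl with h1 | h1
        · omega
        · rw [ht] at h1
          rcases List.mem_cons.1 h1 with h2 | h2
          · rw [h2] at hvl; exact hvl
          · have : pvDv nums k l.toNat < pvDv nums k h'.toNat := by
              have hp := hdec
              rw [ht] at hp
              have := (List.pairwise_cons.1 ((List.pairwise_cons.1 hp).2)).1 l h2
              exact this
            omega
    · intro j hj
      rw [if_pos hpop] at hj
      exact htbnd j hj
  · -- no pop: h itself is in the new window
    have hhd : ∀ j ∈ h :: t, pvDv nums k j.toNat ≤ pvDv nums k h.toNat := by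
      intro j hj
      rcases List.mem_cons.1 hj with h1 | h1
      · rw [h1]
      · exact le_of_lt ((List.pairwise_cons.1 hdec).1 j h1)
    refine ⟨h, t, by simp [hpop], by omega, hbh.2.1, hbh.2.2, ?_, ?_⟩
    · intro j hj0 hjlb hjub
      by_cases hjdq : j ∈ h :: t
      · exact hhd j hjdq
      · obtain ⟨l, hl, hjl, hvl⟩ := hcov j hj0 (by omega) (by omega) hjdq
        exact le_trans hvl (hhd l hl)
    · intro j hj
      rw [if_neg hpop] at hj
      rcases List.mem_cons.1 hj with h1 | h1
      · omega
      · have := htail_lt j h1; omega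

-- with k ≤ 0 the deque is the singleton [m]
lemma pvDqSingleton (nums : List Int) (k : Int) (m : Nat) (dq : List Int)
    (inv : pvDqInv nums k m dq) (hk : k ≤ 0) : dq = [(m:Int)] := by
  obtain ⟨hchain, hbnd, hmem, _, _⟩ := inv
  have hall : ∀ j ∈ dq, j = (m:Int) := by
    intro j hj
    have := hbnd j hj
    have hmin : min ((m:Int) - k) (m:Int) = (m:Int) := by omega
    omega
  cases dq with
  | nil => simp at hmem
  | cons a t =>
    have ha := hall a (by simp)
    cases t with
    | nil => rw [ha]
    | cons b t' =>
      have hb := hall b (by simp)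
      have := (List.pairwise_cons.1 hchain).1 b (by simp)
      omega


lemma pvStepA_empty (nums : List Int) (k : Int) (dp : List Int) (ms h : Int) (i : Int)
    (hc : h < i - k) :
    pvStepA nums k (dp, ms, [h]) i =
      (PySem.List.pySetD dp i (PySem.List.pyGetD nums i 0 + 0),
       max ms (PySem.List.pyGetD nums i 0 + 0),
       [i]) := by
  simp only [pvStepA, if_pos hc]
  rfl

lemma pvStepA_cons (nums : List Int) (k : Int) (dp : List Int) (ms h : Int) (t : List Int)
    (i h' : Int) (t' : List Int) (hdq1 : (if h < i - k then t else h :: t) = h' :: t') :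
    pvStepA nums k (dp, ms, h :: t) i =
      (PySem.List.pySetD dp i (PySem.List.pyGetD nums i 0 + pvDpGet dp h'),
       max ms (PySem.List.pyGetD nums i 0 + pvDpGet dp h'),
       (((h' :: t').reverse.dropWhile (fun j => decide (pvDpGet
           (PySem.List.pySetD dp i (PySem.List.pyGetD nums i 0 + pvDpGet dp h')) j ≤
           PySem.List.pyGetD nums i 0 + pvDpGet dp h'))).reverse) ++ [i]) := by
  simp only [pvStepA, hdq1]

lemma pvInv_step (nums : List Int) (k x : Int) (m : Nat) (hm : m + 1 < nums.length)
    (ih : pvInv nums k x m) : pvInv nums k x (m+1) := by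
  obtain ⟨hlen, hread, hms, hdqI⟩ := ih
  rcases hAst : pvAst nums k x m with ⟨dp, ms, dq⟩
  rw [hAst] at hlen hread hms hdqI
  simp only at hlen hread hms hdqI
  obtain ⟨h, t, hdqe⟩ : ∃ h t, dq = h :: t := by
    have hmemO := hdqI.2.2.1
    cases dq with
    | nil => simp at hmemO
    | cons a b => exact ⟨a, b, rfl⟩
  subst hdqe
  have hAstS : pvAst nums k x (m+1) = pvStepA nums k (dp, ms, h :: t) ((m:Int)+1) := by
    show pvStepA nums k (pvAst nums k x m) ((m:Int)+1) = _
    rw [hAst]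
  have hcast1 : ((m+1:Nat):Int) = (m:Int)+1 := by push_cast; ring
  have hnums : PySem.List.pyGetD nums ((m:Int)+1) 0 = nums.getD (m+1) 0 := by
    rw [← hcast1, PySem.List.pyGetD_natCast]
  obtain ⟨hchainO, hbndO, hmemO, hdecO, hcovO⟩ := hdqI
  by_cases hk : k ≤ 0
  · -- k ≤ 0 : the deque is [m], it is popped, dp[m+1] = nums[m+1]
    have hsingle : h :: t = [(m:Int)] := pvDqSingleton nums k m _ ⟨hchainO, hbndO, hmemO, hdecO, hcovO⟩ hk
    have hh : h = (m:Int) := by injection hsingle with h1 _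
    have ht : t = [] := by injection hsingle with _ h2
    subst hh; subst ht
    have hpop : (m:Int) < (m:Int)+1 - k := by omega
    have hS := pvStepA_empty nums k dp ms (m:Int) ((m:Int)+1) hpop
    rw [hS] at hAstS
    have hdpi_eq : PySem.List.pyGetD nums ((m:Int)+1) 0 + 0 = pvDv nums k (m+1) := by
      rw [hnums, pvDv, pvWv_succ_of_nonpos nums k hk m]
    set dpi := PySem.List.pyGetD nums ((m:Int)+1) 0 + 0 with hdpidef
    have hread' : ∀ j : Nat, j ≤ m+1 →
        PySem.List.pyGetD (PySem.List.pySetD dp ((m:Int)+1) dpi) ((j:Nat):Int) 0 = pvDv nums k j := by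
      intro j hj
      rw [← hcast1, PySem.List.pyGetD_pySetD_natCast dp (m+1) j dpi 0 (by omega)]
      by_cases hjm : j = m+1
      · rw [if_pos hjm, hjm, ← hdpi_eq]
      · rw [if_neg hjm]; exact hread j (by omega)
    refine ⟨?_, ?_, ?_, ?_⟩
    · rw [hAstS]; simpa [PySem.List.length_pySetD] using hlen
    · rw [hAstS]; exact hread'
    · rw [hAstS]
      show PySem.List.max? (pvBdp nums k (m+1+1)) (fun y => y) = some (max ms dpi)
      rw [pvBdp_succ, ← hdpi_eq]
      exact pvMax?_id_concat hms
    · rw [hAstS]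
      show pvDqInv nums k (m+1) [(m:Int)+1]
      refine ⟨by simp, ?_, by rw [hcast1]; simp, by simp, ?_⟩
      · intro j hj
        simp at hj
        subst hj
        refine ⟨min_le_right _ _, by positivity, by push_cast; omega⟩
      · intro j hj0 hjlb hjub hjn
        exfalso
        apply hjn
        simp only [List.mem_singleton]
        push_cast at hjlb hjub
        omega
  · -- 1 ≤ k : the head of the (possibly popped) deque is the window maximum
    have hk1 : (1:Int) ≤ k := by omega
    obtain ⟨h', t', he, hlb, h0, hub, hdom, hall⟩ :=
      pvHeadDom nums k m h t ⟨hchainO, hbndO, hmemO, hdecO, hcovO⟩ hk1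
    have hS := pvStepA_cons nums k dp ms h t ((m:Int)+1) h' t' he
    rw [hS] at hAstS
    have htop : pvDpGet dp h' = pvDv nums k h'.toNat := by
      rw [pvDpGet, ← Int.toNat_of_nonneg h0]
      exact hread h'.toNat (by omega)
    have hdpi_eq : PySem.List.pyGetD nums ((m:Int)+1) 0 + pvDpGet dp h' = pvDv nums k (m+1) := by
      rw [hnums, htop]
      conv_rhs => rw [pvDv]
      rw [pvWv_succ_eq nums k m h' h0 hub hlb hdom]
    set dpi := PySem.List.pyGetD nums ((m:Int)+1) 0 + pvDpGet dp h' with hdpidef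
    set dp' := PySem.List.pySetD dp ((m:Int)+1) dpi with hdp'def
    have hread' : ∀ j : Nat, j ≤ m+1 →
        PySem.List.pyGetD dp' ((j:Nat):Int) 0 = pvDv nums k j := by
      intro j hj
      rw [hdp'def, ← hcast1, PySem.List.pyGetD_pySetD_natCast dp (m+1) j dpi 0 (by omega)]
      by_cases hjm : j = m+1
      · rw [if_pos hjm, hjm, ← hdpi_eq]
      · rw [if_neg hjm]; exact hread j (by omega)
    have hreadInt : ∀ j : Int, 0 ≤ j → j ≤ (m:Int) → pvDpGet dp' j = pvDv nums k j.toNat := by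
      intro j hj0 hjub
      rw [pvDpGet, ← Int.toNat_of_nonneg hj0]
      exact hread' j.toNat (by omega)
    have hdvm1 : pvDv nums k ((m:Int)+1).toNat = dpi := by
      rw [show ((m:Int)+1).toNat = m+1 by omega, hdpi_eq]
    -- facts about dq1 = h' :: t'
    have hsubdq : List.Sublist (h' :: t') (h :: t) := by
      rw [← he]
      split
      · exact List.sublist_cons_self _ _
      · exact List.Sublist.refl _
    have hbnd1 : ∀ j ∈ h' :: t', 0 ≤ j ∧ j ≤ (m:Int) ∧ (m:Int)+1-k ≤ j := by
      intro j hj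
      have := hbndO j (hsubdq.mem hj)
      exact ⟨this.2.1, this.2.2, hall j (by rw [he]; exact hj)⟩
    set p : Int → Bool := fun j => decide (pvDpGet dp' j ≤ dpi) with hp
    set L : List Int := ((h' :: t').reverse.dropWhile p).reverse with hL
    have hLpre : L <+: h' :: t' := pvPopback_prefix p _
    have hLmem : ∀ j ∈ L, j ∈ h' :: t' := fun j hj => hLpre.sublist.mem hj
    have hptrue : ∀ j ∈ h' :: t', p j = true → pvDv nums k j.toNat ≤ dpi := by
      intro j hj hpj
      have hb := hbnd1 j hj
      rw [hp] at hpj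
      simp only [decide_eq_true_eq] at hpj
      rwa [hreadInt j hb.1 hb.2.1] at hpj
    -- the elements kept by the back-pop all have value > dpi
    have hLgt : ∀ j ∈ L, dpi < pvDv nums k j.toNat := by
      intro j hj
      cases hdw : (h' :: t').reverse.dropWhile p with
      | nil => rw [hL, hdw] at hj; simp at hj
      | cons j0 rest =>
        have hj0f : p j0 = false := by
          have := List.head_dropWhile_not p (l := (h' :: t').reverse) (by rw [hdw]; simp)
          simp only [hdw, List.head_cons] at this
          exact this
        have hj0mem : j0 ∈ h' :: t' := by
          have : j0 ∈ (h' :: t').reverse.dropWhile p := by rw [hdw]; simp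
          exact List.mem_reverse.1 ((List.dropWhile_suffix p).sublist.mem this)
        have hj0gt : dpi < pvDv nums k j0.toNat := by
          have hb := hbnd1 j0 hj0mem
          rw [hp] at hj0f
          simp only [decide_eq_false_iff_not] at hj0f
          rw [hreadInt j0 hb.1 hb.2.1] at hj0f
          omega
        have hLe : L = rest.reverse ++ [j0] := by rw [hL, hdw]; simp
        rw [hLe] at hj
        rcases List.mem_append.1 hj with hjr | hjr
        · -- j before j0 in L : pairwise-decreasing gives dv j0 < dv j
          have hLdec : L.Pairwise (fun a b => pvDv nums k b.toNat < pvDv nums k a.toNat) :=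
            hdecO.sublist (hLpre.sublist.trans hsubdq)
          rw [hLe] at hLdec
          have := (List.pairwise_append.1 hLdec).2.2 j hjr j0 (by simp)
          omega
        · simp at hjr; subst hjr; exact hj0gt
    -- the new deque
    refine ⟨?_, ?_, ?_, ?_⟩
    · rw [hAstS]
      show dp'.length = nums.length
      rw [hdp'def, PySem.List.length_pySetD]
      exact hlen
    · rw [hAstS]; exact hread'
    · rw [hAstS]
      show PySem.List.max? (pvBdp nums k (m+1+1)) (fun y => y) = some (max ms dpi)
      rw [pvBdp_succ, ← hdpi_eq]
      exact pvMax?_id_concat hms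
    · rw [hAstS]
      show pvDqInv nums k (m+1) (L ++ [(m:Int)+1])
      refine ⟨?_, ?_, ?_, ?_, ?_⟩
      · -- strictly increasing
        rw [List.pairwise_append]
        refine ⟨hchainO.sublist (hLpre.sublist.trans hsubdq), by simp, ?_⟩
        intro a ha b hb
        simp at hb
        subst hb
        have := (hbnd1 a (hLmem a ha)).2.1
        omega
      · -- bounds
        intro j hj
        rcases List.mem_append.1 hj with hjl | hjr
        · have hb := hbnd1 j (hLmem j hjl)
          refine ⟨?_, hb.1, by push_cast; omega⟩
          have : min (((m+1:Nat):Int) - k) ((m+1:Nat):Int) = ((m+1:Nat):Int) - k := by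
            push_cast; omega
          rw [this, hcast1]
          exact hb.2.2
        · simp at hjr
          subst hjr
          refine ⟨by rw [hcast1]; exact min_le_right _ _, by positivity, by push_cast; omega⟩
      · rw [hcast1]
        exact List.mem_append_right _ (by simp)
      · -- strictly decreasing dp values
        rw [List.pairwise_append]
        refine ⟨hdecO.sublist (hLpre.sublist.trans hsubdq), by simp, ?_⟩
        intro a ha b hb
        simp at hb
        subst hb
        rw [hdvm1]
        exact hLgt a ha
      · -- coverage
        intro j hj0 hjlb hjub hjn
        have hji : j ≠ (m:Int)+1 := by
          intro hc
          exact hjn (by rw [hc, ← hcast1]; exact List.mem_append_right _ (by simp [hcast1]))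
        have hjm : j ≤ (m:Int) := by push_cast at hjub; omega
        have hjlb' : (m:Int)+1-k ≤ j := by push_cast at hjlb; omega
        by_cases hj1 : j ∈ h' :: t'
        · rcases pvPopback_mem_or p (h' :: t') j hj1 with hjL | hjp
          · exact absurd (List.mem_append_left _ hjL) hjn
          · refine ⟨(m:Int)+1, List.mem_append_right _ (by simp), by omega, ?_⟩
            rw [hdvm1]
            exact hptrue j hj1 hjp
        · -- j not in the popped deque: it was never in the old deque either
          have hjdq : j ∉ h :: t := by
            intro hc
            rcases List.mem_cons.1 hc with h1 | h1
            · -- j = h : possible only if h was stale-popped, but then h < m+1-k ≤ j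
              subst h1
              by_cases hpop : j < (m:Int)+1-k
              · omega
              · rw [if_neg hpop] at he
                exact hj1 (by rw [← he]; simp)
            · by_cases hpop : h < (m:Int)+1-k
              · rw [if_pos hpop] at he
                exact hj1 (by rw [← he]; exact h1)
              · rw [if_neg hpop] at he
                exact hj1 (by rw [← he]; exact List.mem_cons_of_mem _ h1)
          obtain ⟨l, hl, hjl, hvl⟩ := hcovO j hj0 (by omega) (by omega) hjdq
          have hl1 : l ∈ h' :: t' := by
            rcases List.mem_cons.1 hl with h1 | h1
            · -- l = h : impossible in the pop case, fine otherwise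
              subst h1
              by_cases hpop : l < (m:Int)+1-k
              · omega
              · rw [if_neg hpop] at he
                rw [← he]; simp
            · by_cases hpop : h < (m:Int)+1-k
              · rw [if_pos hpop] at he
                rw [← he]; exact h1
              · rw [if_neg hpop] at he
                rw [← he]; exact List.mem_cons_of_mem _ h1
          rcases pvPopback_mem_or p (h' :: t') l hl1 with hlL | hlp
          · exact ⟨l, List.mem_append_left _ hlL, hjl, hvl⟩
          · refine ⟨(m:Int)+1, List.mem_append_right _ (by simp), by omega, ?_⟩
            rw [hdvm1]
            exact le_trans hvl (hptrue l hl1 hlp)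

lemma pvInv_holds (nums : List Int) (k x : Int) (rest : List Int) (hx : nums = x :: rest) :
    ∀ m : Nat, m < nums.length → pvInv nums k x m := by
  intro m
  induction m with
  | zero =>
    intro hm
    have hn : 0 < nums.length := hm
    have hdv0 : pvDv nums k 0 = x := by
      rw [pvDv, pvWv_zero, hx]
      simp [List.getD]
    refine ⟨?_, ?_, ?_, ?_⟩
    · show (PySem.List.pySetD (List.replicate nums.length 0) 0 x).length = nums.length
      simp [PySem.List.length_pySetD]
    · intro j hj
      interval_cases j
      show PySem.List.pyGetD (PySem.List.pySetD (List.replicate nums.length 0) 0 x) ((0:Nat):Int) 0 = pvDv nums k 0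
      rw [show ((0:Nat):Int) = ((0:Nat):Int) from rfl, hdv0]
      have := PySem.List.pyGetD_pySetD_natCast (List.replicate nums.length (0:Int)) 0 0 x 0 (by simpa using hn)
      simpa using this
    · show PySem.List.max? (pvBdp nums k 1) (fun y => y) = some x
      rw [show (1:Nat) = 0 + 1 from rfl, pvBdp_succ]
      simp only [pvBdp, List.nil_append]
      rw [PySem.List.max?_id_cons, hdv0]
      simp
    · show pvDqInv nums k 0 [(0:Int)]
      refine ⟨by simp, ?_, by simp, by simp, ?_⟩
      · intro j hj
        simp at hj
        subst hj
        exact ⟨min_le_right _ _, le_refl _, by simp⟩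
      · intro j hj0 hjlb hjub hjn
        exfalso
        apply hjn
        simp only [List.mem_singleton]
        omega
  | succ m ih =>
    intro hm
    exact pvInv_step nums k x m hm (ih (by omega))

-- ===== VERDICT (by name: the statement is the Claim_ definition above) =====
theorem maxSubsequenceSum_spec : Claim_equal_maxSubsequenceSum := by
  intro nums k hdom hpre
  unfold Spec_maxSubsequenceSum
  cases nums with
  | nil => exact absurd rfl hpre
  | cons x rest =>
    have hn : 0 < (x :: rest).length := by simp
    have hinv := pvInv_holds (x :: rest) k x rest rfl ((x :: rest).length - 1) (by omega)
    obtain ⟨-, -, hms, -⟩ := hinv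
    rw [pvRunA, pvAltB]
    rw [show (x :: rest).length - 1 + 1 = (x :: rest).length from by omega] at hms
    rw [hms]
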